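-- pv_equiv track=rewrite | github.com/Devdev501e/Agenda | filter.py | bonjour
-- ===== SOURCE A (Python) =====
-- def bonjour(text):
--     content = ""
--     b = False
--     n_space = 0
--     for i in text:
--         if i != "\n":
--             b = True
--             n_space = 0
--         if i == "\n" and b:
--             n_space += 1
--         if b and n_space < 2:
--             content += i
--     return content
-- ===== SOURCE B (Python) =====
-- def bonjour(text):
--     s = text.lstrip("\n")
--     return s[:1] + "".join(c for p, c in zip(s, s[1:]) if not (p == "\n" and c == "\n"))
-- ===== Notes on version B (the rewrite author's own statement) =====
-- stated objective: simpler
-- what changed: Replaces A's char-by-char state machine (seen-content flag plus newline counter with string +=) by stripping leading newlines with lstrip and then keeping each character of the rest unless it and its predecessor are both newlines, via one zip/join pairwise filter.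
import Mathlib
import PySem

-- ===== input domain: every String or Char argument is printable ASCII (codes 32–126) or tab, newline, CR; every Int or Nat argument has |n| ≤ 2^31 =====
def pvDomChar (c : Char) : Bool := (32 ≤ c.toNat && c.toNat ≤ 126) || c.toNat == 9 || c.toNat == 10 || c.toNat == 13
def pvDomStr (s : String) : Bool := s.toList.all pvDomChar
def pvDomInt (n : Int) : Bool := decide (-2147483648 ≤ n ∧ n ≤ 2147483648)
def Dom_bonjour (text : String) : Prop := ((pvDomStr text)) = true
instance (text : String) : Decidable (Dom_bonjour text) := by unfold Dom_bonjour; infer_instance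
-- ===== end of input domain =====

-- B collapses leading/extra newlines by dropping leading newlines then a pairwise
-- (previous,current) filter instead of A's per-char flag/counter state machine (simpler).


-- ===== PORT A =====
-- literal transliteration of A's loop; `content += i` is carried as a List Char
-- accumulator (appended at the back) and packed with String.mk at the end
def bonjourLoop : List Char → List Char → Bool → Int → List Char
  | [], content, _b, _ns => content
  | i :: rest, content, b, ns =>
    let b' := if i ≠ '\n' then true else b
    let ns' := if i ≠ '\n' then 0 else ns
    let ns'' := if i = '\n' ∧ b' = true then ns' + 1 else ns'
    let content' := if b' = true ∧ ns'' < 2 then content ++ [i] else content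
    bonjourLoop rest content' b' ns''

def bonjour (text : String) : String :=
  String.mk (bonjourLoop text.toList [] false 0)

-- ===== PORT B =====
-- Source B: s = text.lstrip("\n"); return s[:1] + "".join(c for p, c in zip(s, s[1:]) if not (p == "\n" and c == "\n"))
def bonjour_alt (text : String) : String :=
  let s := text.toList.dropWhile (fun c => c = '\n')
  String.mk (s.take 1 ++
    ((s.zip s.tail).filter (fun pc => ¬(pc.1 = '\n' ∧ pc.2 = '\n'))).map Prod.snd)

-- ===== PRECONDITION & SPEC =====
def Spec_bonjour (text : String) (out : String) : Prop := out = bonjour_alt text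
instance (text : String) (out : String) : Decidable (Spec_bonjour text out) := by unfold Spec_bonjour; infer_instance

-- ===== CLAIM =====
def Claim_equal_bonjour : Prop := ∀ (text : String), Dom_bonjour text → Spec_bonjour text (bonjour text)

-- ===== LEMMAS AND PROOFS =====
-- proof-side characterisation of the collapsed text: runs of ≥2 newlines squeezed to one
def collapseNL : List Char → List Char
  | [] => []
  | [a] => [a]
  | a :: b :: t =>
    if a = '\n' ∧ b = '\n' then collapseNL (a :: t) else a :: collapseNL (b :: t)

lemma collapse_cons_ne (i : Char) (rest : List Char) (hi : ¬ i = '\n') :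
    collapseNL (i :: rest) = i :: collapseNL rest := by
  cases rest with
  | nil => simp [collapseNL]
  | cons b t => simp [collapseNL, hi]

lemma collapse_cons_nl (rest : List Char) :
    collapseNL ('\n' :: rest) = '\n' :: collapseNL (rest.dropWhile (fun c => c = '\n')) := by
  induction rest with
  | nil => simp [collapseNL, List.dropWhile]
  | cons b t ih =>
    by_cases hb : b = '\n'
    · subst hb
      simp only [collapseNL, List.dropWhile]
      simp [ih]
    · simp [collapseNL, hb, List.dropWhile]

lemma loop_ge1 (l : List Char) : ∀ (c : List Char) (ns : Int), 1 ≤ ns →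
    bonjourLoop l c true ns = bonjourLoop l c true 1 := by
  induction l with
  | nil => intro c ns _; rfl
  | cons i rest ih =>
    intro c ns hns
    by_cases hi : i = '\n'
    · subst hi
      have h1 : ¬ (ns + 1 < (2:Int)) := by omega
      simp only [bonjourLoop]
      simp [h1]
      rw [ih c (ns + 1) (by omega)]
      exact (ih c (1 + 1) (by omega)).symm
    · simp [bonjourLoop, hi]

lemma loopM (l : List Char) :
    (∀ c, bonjourLoop l c true 0 = c ++ collapseNL l) ∧
    (∀ c, bonjourLoop l c true 1 = c ++ collapseNL (l.dropWhile (fun x => x = '\n'))) := by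
  induction l with
  | nil => exact ⟨fun c => by simp [bonjourLoop, collapseNL],
                  fun c => by simp [bonjourLoop, collapseNL, List.dropWhile]⟩
  | cons i rest ih =>
    constructor
    · intro c
      by_cases hi : i = '\n'
      · subst hi
        have h3 : bonjourLoop ('\n' :: rest) c true 0 = bonjourLoop rest (c ++ ['\n']) true 1 := by
          norm_num [bonjourLoop]
        rw [h3, ih.2, collapse_cons_nl]
        simp
      · have h3 : bonjourLoop (i :: rest) c true 0 = bonjourLoop rest (c ++ [i]) true 0 := by
          norm_num [bonjourLoop, hi]
        rw [h3, ih.1, collapse_cons_ne i rest hi]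
        simp
    · intro c
      by_cases hi : i = '\n'
      · subst hi
        have h3 : bonjourLoop ('\n' :: rest) c true 1 = bonjourLoop rest c true (1 + 1) := by
          norm_num [bonjourLoop]
        rw [h3, loop_ge1 rest c (1 + 1) (by omega), ih.2]
        congr 1
      · have h3 : bonjourLoop (i :: rest) c true 1 = bonjourLoop rest (c ++ [i]) true 0 := by
          norm_num [bonjourLoop, hi]
        rw [h3, ih.1]
        have hd : (i :: rest).dropWhile (fun x => x = '\n') = i :: rest := by simp [hi]
        rw [hd, collapse_cons_ne i rest hi]
        simp

lemma loop_start (l : List Char) :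
    bonjourLoop l [] false 0 = collapseNL (l.dropWhile (fun c => c = '\n')) := by
  induction l with
  | nil => simp [bonjourLoop, collapseNL, List.dropWhile]
  | cons i rest ih =>
    by_cases hi : i = '\n'
    · subst hi
      have h3 : bonjourLoop ('\n' :: rest) [] false 0 = bonjourLoop rest [] false 0 := by
        norm_num [bonjourLoop]
      rw [h3, ih]
      congr 1
    · have h3 : bonjourLoop (i :: rest) [] false 0 = bonjourLoop rest [i] true 0 := by
        norm_num [bonjourLoop, hi]
      rw [h3, (loopM rest).1]
      have hd : (i :: rest).dropWhile (fun c => c = '\n') = i :: rest := by simp [hi]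
      rw [hd, collapse_cons_ne i rest hi]
      simp

lemma collapse_eq_pairfilter (l : List Char) :
    collapseNL l = l.take 1 ++
      ((l.zip l.tail).filter (fun pc => ¬(pc.1 = '\n' ∧ pc.2 = '\n'))).map Prod.snd := by
  induction l using collapseNL.induct with
  | case1 => simp [collapseNL]
  | case2 a => simp [collapseNL]
  | case3 a b t h ih =>
    obtain ⟨ha, hb⟩ := h
    subst ha; subst hb
    simp only [collapseNL, if_pos (And.intro rfl rfl)]
    rw [ih]
    cases t with
    | nil => simp
    | cons x t' => simp
  | case4 a b t h ih =>
    have hf : (!decide (a = '\n') || !decide (b = '\n')) = true := by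
      by_cases ha : a = '\n' <;> by_cases hb : b = '\n' <;> simp_all
    simp only [collapseNL, if_neg h]
    rw [ih]
    simp [List.filter_cons, hf]

-- ===== VERDICT =====
theorem bonjour_spec : Claim_equal_bonjour := by
  intro text _
  unfold Spec_bonjour bonjour bonjour_alt
  rw [loop_start, collapse_eq_pairfilter]
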